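-- pv_equiv track=rewrite | github.com/jhoguaman/LLoPyTwoMains | main.py | decode_ds1307
-- ===== SOURCE A (Python) =====
-- def decode_ds1307(valor_rtc_int):
--     binstring = ''
--     x=int(valor_rtc_int)
--     while True:
--         q, r = divmod(x, 10)
--         nibble = bin(r).replace('0b', "")
--         while len(nibble) < 4:
--             nibble = '0' + nibble
--         binstring = nibble + binstring
--         if q == 0:
--             break
--         else:
--             x = q
--     valorhex = int(binstring, 2)
--     return valorhex
-- ===== SOURCE B (Python) =====
-- def decode_ds1307(valor_rtc_int):
--     # BCD decode by direct arithmetic recursion: each decimal digit becomes a hex nibble.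
--     x = int(valor_rtc_int)
--     if x < 10:
--         return x
--     return decode_ds1307(x // 10) * 16 + x % 10
-- ===== Notes on version B (the rewrite author's own statement) =====
-- stated objective: simpler
-- what changed: Replaces A's loop that builds a padded binary nibble string least-significant-first and reparses it as base 2 with a direct arithmetic recursion decode(x) = decode(x//10)*16 + x%10, eliminating the intermediate string entirely; Pre_ requires 0 <= x because A loops forever on negative input.
import Mathlib
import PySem

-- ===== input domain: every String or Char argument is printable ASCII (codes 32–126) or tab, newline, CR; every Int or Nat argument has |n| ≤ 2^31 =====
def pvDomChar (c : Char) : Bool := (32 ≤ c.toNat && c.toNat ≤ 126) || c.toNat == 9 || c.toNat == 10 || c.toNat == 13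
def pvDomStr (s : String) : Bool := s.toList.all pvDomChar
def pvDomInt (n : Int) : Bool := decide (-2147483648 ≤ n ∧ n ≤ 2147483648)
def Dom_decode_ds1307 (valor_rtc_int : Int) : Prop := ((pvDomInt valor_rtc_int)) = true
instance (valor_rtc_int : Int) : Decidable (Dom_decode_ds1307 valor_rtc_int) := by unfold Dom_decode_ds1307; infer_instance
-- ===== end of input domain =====

-- B replaces A's binary-nibble-string build + base-2 reparse by a direct arithmetic
-- recursion decode(x//10)*16 + x%10 (objective: simpler; no speed claim).

-- ===== PORT A =====
-- bin(n) without the '0b' prefix, for n ≥ 0 (the r of divmod(x,10) is always ≥ 0): empty for 0 handled in binA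
def binCore (n : Nat) : List Char :=
  if n = 0 then [] else binCore (n / 2) ++ [if n % 2 = 1 then '1' else '0']

-- bin(r).replace('0b', "") for r ≥ 0
def binA (n : Nat) : List Char := if n = 0 then ['0'] else binCore n

-- while len(nibble) < 4: nibble = '0' + nibble
def pad4 (l : List Char) : List Char :=
  if l.length < 4 then pad4 ('0' :: l) else l
termination_by 4 - l.length

-- the while-True loop of A; binstring is a List Char built by prepending.
-- Python diverges when q ≠ 0 with x ≤ 0 (negative input); the 'x ≤ 0' guard only
-- makes the port total there — such inputs are outside Pre_decode_ds1307.
def loopA (x : Int) (bs : List Char) : List Char :=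
  let q := PySem.Int.floordiv x 10
  let r := PySem.Int.mod x 10
  let nibble := pad4 (binA r.toNat)
  let bs' := nibble ++ bs
  if q = 0 then bs'
  else if x ≤ 0 then bs'  -- divergence guard (outside Pre_)
  else loopA q bs'
termination_by x.toNat
decreasing_by
  have h10 : (0:Int) < 10 := by norm_num
  rw [PySem.Int.floordiv_eq_ediv_of_pos h10] at *
  omega

-- int(binstring, 2): binstring is always a nonempty string of '0'/'1' with no sign,
-- whitespace, prefix or underscore; on that domain int(s, 2) is exactly this fold.
def parse2 (a : Int) (bs : List Char) : Int :=
  bs.foldl (fun acc c => 2 * acc + (if c = '1' then 1 else 0)) a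

def decode_ds1307 (valor_rtc_int : Int) : Int :=
  parse2 0 (loopA valor_rtc_int [])

-- ===== PORT B =====
-- x = int(valor_rtc_int) is the identity on an int argument
def decode_ds1307_alt (valor_rtc_int : Int) : Int :=
  if valor_rtc_int < 10 then valor_rtc_int
  else decode_ds1307_alt (PySem.Int.floordiv valor_rtc_int 10) * 16 + PySem.Int.mod valor_rtc_int 10
termination_by valor_rtc_int.toNat
decreasing_by
  have h10 : (0:Int) < 10 := by norm_num
  rw [PySem.Int.floordiv_eq_ediv_of_pos h10]
  omega

-- ===== PRECONDITION & SPEC =====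
-- Pre_ excludes negative inputs: there A's while-loop never reaches q == 0 and diverges.
def Pre_decode_ds1307 (valor_rtc_int : Int) : Prop := 0 ≤ valor_rtc_int
instance (valor_rtc_int : Int) : Decidable (Pre_decode_ds1307 valor_rtc_int) := by unfold Pre_decode_ds1307; infer_instance
def pvWitness_decode_ds1307 : Int := (59)

def Spec_decode_ds1307 (valor_rtc_int : Int) (out : Int) : Prop := out = decode_ds1307_alt valor_rtc_int
instance (valor_rtc_int : Int) (out : Int) : Decidable (Spec_decode_ds1307 valor_rtc_int out) := by unfold Spec_decode_ds1307; infer_instance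

-- ===== CLAIM (what is proved, stated in full; the proofs are below) =====
def Claim_equal_decode_ds1307 : Prop := ∀ (valor_rtc_int : Int), Dom_decode_ds1307 valor_rtc_int → Pre_decode_ds1307 valor_rtc_int → Spec_decode_ds1307 valor_rtc_int (decode_ds1307 valor_rtc_int)

-- ===== LEMMAS AND PROOFS =====

-- one nibble: parsing pad4 (binA r) from accumulator a multiplies a by 16 and adds r (r a decimal digit)
theorem parse2_nib (r : Int) (hr0 : 0 ≤ r) (hr : r < 10) (a : Int) :
    parse2 a (pad4 (binA r.toNat)) = 16 * a + r := by
  interval_cases r <;> simp [parse2, binA, binCore, pad4] <;> ring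

-- the loop only prepends: loopA x bs = loopA x [] ++ bs
theorem loopA_append (x : Int) (bs : List Char) : loopA x bs = loopA x [] ++ bs := by
  generalize hn : x.toNat = n
  induction n using Nat.strong_induction_on generalizing x bs with
  | _ n ih =>
    rw [loopA]
    conv_rhs => rw [loopA]
    have hqe : PySem.Int.floordiv x 10 = x / 10 :=
      PySem.Int.floordiv_eq_ediv_of_pos (by norm_num)
    simp only [hqe]
    by_cases hq : x / 10 = 0
    · simp [hq]
    · by_cases hx : x ≤ 0
      · simp [hq, hx]
      · have hlt : (x / 10).toNat < n := by omega
        simp only [hq, hx, if_false]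
        rw [ih _ hlt (x / 10) _ rfl, ih _ hlt (x / 10) (pad4 (binA (PySem.Int.mod x 10).toNat) ++ []) rfl]
        simp

-- main: parsing the loop's string from accumulator 0 is exactly B's recursion
theorem parse2_loopA (x : Int) (hx : 0 ≤ x) : parse2 0 (loopA x []) = decode_ds1307_alt x := by
  generalize hn : x.toNat = n
  induction n using Nat.strong_induction_on generalizing x with
  | _ n ih =>
    have h10 : (0:Int) < 10 := by norm_num
    have hqe : PySem.Int.floordiv x 10 = x / 10 := PySem.Int.floordiv_eq_ediv_of_pos h10
    have hre : PySem.Int.mod x 10 = x % 10 := PySem.Int.mod_eq_emod_of_pos h10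
    by_cases hsmall : x < 10
    · have hq : PySem.Int.floordiv x 10 = 0 := by rw [hqe]; omega
      have hr : PySem.Int.mod x 10 = x := by rw [hre]; omega
      rw [loopA]
      simp only [hq, if_true, List.append_nil]
      rw [hr, parse2_nib x hx hsmall 0, decode_ds1307_alt]
      simp [hsmall]
    · have hq0 : PySem.Int.floordiv x 10 ≠ 0 := by rw [hqe]; omega
      have hxpos : ¬ x ≤ 0 := by omega
      rw [loopA]
      simp only [hq0, hxpos, if_false]
      rw [loopA_append]
      have hqnn : 0 ≤ PySem.Int.floordiv x 10 := by rw [hqe]; omega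
      have hlt : (PySem.Int.floordiv x 10).toNat < n := by rw [hqe]; omega
      have hrb : 0 ≤ PySem.Int.mod x 10 ∧ PySem.Int.mod x 10 < 10 := by rw [hre]; omega
      calc parse2 0 (loopA (PySem.Int.floordiv x 10) [] ++ (pad4 (binA (PySem.Int.mod x 10).toNat) ++ []))
          = parse2 (parse2 0 (loopA (PySem.Int.floordiv x 10) []))
              (pad4 (binA (PySem.Int.mod x 10).toNat)) := by
            simp [parse2, List.foldl_append]
        _ = 16 * decode_ds1307_alt (PySem.Int.floordiv x 10) + PySem.Int.mod x 10 := by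
            rw [ih _ hlt _ hqnn rfl, parse2_nib _ hrb.1 hrb.2]
        _ = decode_ds1307_alt x := by
            conv_rhs => rw [decode_ds1307_alt, if_neg hsmall]
            ring

-- ===== VERDICT (by name: the statement is the Claim_ definition above) =====
theorem decode_ds1307_spec : Claim_equal_decode_ds1307 := by
  intro x _ hpre
  unfold Spec_decode_ds1307 decode_ds1307
  exact parse2_loopA x hpre
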